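-- pv_equiv track=rewrite | github.com/Hero0963/poker_game | py_poker13tw/cp_check_poker_hand.py | is_five_of_a_kind
-- ===== SOURCE A (Python) =====
-- from typing import List
-- import collections
--
-- def get_card_suit(card):
--     suits = ['黑桃', '愛心', '方塊', '梅花']
--     return suits[(card - 1) // 13]
--
-- def get_card_rank(card):
--     ranks = ['2', '3', '4', '5', '6', '7', '8', '9', '10', 'J', 'Q', 'K', 'A']
--     return ranks[(card - 1) % 13]
--
-- def convert_rank_value(rank):
--     rk = ['', '', '2', '3', '4', '5', '6', '7', '8', '9', '10', 'J', 'Q', 'K', 'A']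
--     return rk.index(rank)
--
-- def is_five_of_a_kind(cards: List[int]) -> bool:
--     if len(cards) != 5:
--         return False
--
--     record_rk_value = collections.defaultdict(int)
--     for card in cards:
--         suit, rank = get_card_suit(card), get_card_rank(card)
--         rk_value = convert_rank_value(rank)
--         record_rk_value[rk_value] += 1
--
--     for rk_value, count in record_rk_value.items():
--         if count == 5:
--             return True
--     return False
-- ===== SOURCE B (Python) =====
-- from typing import List
--
--
-- def get_card_rank(card):
--     ranks = ['2', '3', '4', '5', '6', '7', '8', '9', '10', 'J', 'Q', 'K', 'A']
--     return ranks[(card - 1) % 13]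
--
--
-- def is_five_of_a_kind(cards: List[int]) -> bool:
--     if len(cards) != 5:
--         return False
--     first = get_card_rank(cards[0])
--     return all(get_card_rank(c) == first for c in cards)
-- ===== Notes on version B (the rewrite author's own statement) =====
-- stated objective: simpler
-- what changed: B drops the rank-value frequency dict and its second scan over buckets: it computes the first card's rank string once and returns all(get_card_rank(c) == first), a single comparison pass with no table and no suit/rank-value conversion.
import Mathlib
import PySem

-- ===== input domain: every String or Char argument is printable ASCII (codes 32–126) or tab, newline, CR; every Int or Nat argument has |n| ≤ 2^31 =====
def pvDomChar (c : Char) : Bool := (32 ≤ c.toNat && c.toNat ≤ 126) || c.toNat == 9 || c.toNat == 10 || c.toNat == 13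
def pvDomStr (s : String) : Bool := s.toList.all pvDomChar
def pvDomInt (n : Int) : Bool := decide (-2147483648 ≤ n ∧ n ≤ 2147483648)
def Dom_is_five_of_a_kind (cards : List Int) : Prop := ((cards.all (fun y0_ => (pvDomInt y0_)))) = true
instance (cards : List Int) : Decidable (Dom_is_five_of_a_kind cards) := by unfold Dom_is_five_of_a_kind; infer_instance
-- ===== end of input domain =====

-- B replaces A's rank-value frequency dict + bucket scan by a single comparison of every
-- card's rank string with the first card's (objective: simpler).

-- ===== PORT A =====
def pv_suits : List String := ["黑桃", "愛心", "方塊", "梅花"]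
def pv_ranks : List String := ["2", "3", "4", "5", "6", "7", "8", "9", "10", "J", "Q", "K", "A"]
def pv_rk : List String := ["", "", "2", "3", "4", "5", "6", "7", "8", "9", "10", "J", "Q", "K", "A"]

-- suits[(card-1)//13]: can raise IndexError (none), excluded by Pre_
def get_card_suit? (card : Int) : Option String :=
  PySem.List.pyGet? pv_suits (PySem.Int.floordiv (card - 1) 13)

-- ranks[(card-1)%13]: the index is always in 0..12, so the lookup never raises; pyGetD is exact here
def get_card_rank (card : Int) : String :=
  PySem.List.pyGetD pv_ranks (PySem.Int.mod (card - 1) 13) ""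

-- rk.index(rank): ValueError = none (never hit: the argument is always a member of pv_rk)
def convert_rank_value? (rank : String) : Option Int :=
  (PySem.List.index? pv_rk rank).map (fun n => (n : Int))

def is_five_of_a_kind (cards : List Int) : Bool :=
  if cards.length ≠ 5 then false
  else
    match cards.foldl (fun acc card =>
        acc.bind (fun d =>
          (get_card_suit? card).bind (fun _ =>
            (convert_rank_value? (get_card_rank card)).map (fun rv =>
              d.insert rv (d.getD rv 0 + 1)))))
      (some (PySem.Dict.empty : PySem.Dict Int Int)) with
    | none => false   -- an exception was raised inside the loop; outside Pre_
    | some d => d.items.any (fun p => p.2 == 5)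

-- ===== PORT B =====
def is_five_of_a_kind_alt (cards : List Int) : Bool :=
  if cards.length ≠ 5 then false
  else
    match PySem.List.pyGet? cards 0 with
    | none => false   -- unreachable: length is 5
    | some c0 => cards.all (fun c => get_card_rank c == get_card_rank c0)

-- ===== PRECONDITION & SPEC =====
-- Pre_ excludes exactly the 5-card inputs holding a card whose suit index (card-1)//13 falls
-- outside the suits list even after Python's negative indexing: there A raises IndexError.
def Pre_is_five_of_a_kind (cards : List Int) : Prop :=
  cards.length ≠ 5 ∨ ∀ c ∈ cards, -51 ≤ c ∧ c ≤ 52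
instance (cards : List Int) : Decidable (Pre_is_five_of_a_kind cards) := by
  unfold Pre_is_five_of_a_kind; infer_instance
def pvWitness_is_five_of_a_kind : List Int := [1, 14, 27, 40, 1]

def Spec_is_five_of_a_kind (cards : List Int) (out : Bool) : Prop := out = is_five_of_a_kind_alt cards
instance (cards : List Int) (out : Bool) : Decidable (Spec_is_five_of_a_kind cards out) := by unfold Spec_is_five_of_a_kind; infer_instance

-- ===== CLAIM (what is proved, stated in full; the proofs are below) =====
def Claim_equal_is_five_of_a_kind : Prop := ∀ (cards : List Int), Dom_is_five_of_a_kind cards → Pre_is_five_of_a_kind cards → Spec_is_five_of_a_kind cards (is_five_of_a_kind cards)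

-- ===== LEMMAS AND PROOFS =====

-- abbreviation used only by the proofs: the rank index (card-1) % 13
def pvRv (c : Int) : Int := PySem.Int.mod (c - 1) 13

lemma pvRv_bounds (c : Int) : 0 ≤ pvRv c ∧ pvRv c < 13 :=
  ⟨PySem.Int.mod_nonneg _ (by norm_num), PySem.Int.mod_lt _ (by norm_num)⟩

lemma suit_isSome (c : Int) (h1 : -51 ≤ c) (h2 : c ≤ 52) :
    (get_card_suit? c).isSome = true := by
  have h3 : -4 ≤ PySem.Int.floordiv (c - 1) 13 :=
    (PySem.Int.le_floordiv_iff_mul_le (by norm_num)).mpr (by omega)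
  have h4 : PySem.Int.floordiv (c - 1) 13 < 4 :=
    (PySem.Int.floordiv_lt_iff_lt_mul (by norm_num)).mpr (by omega)
  unfold get_card_suit?
  set i := PySem.Int.floordiv (c - 1) 13 with hi
  interval_cases i <;> decide

lemma crv_rank (c : Int) :
    convert_rank_value? (get_card_rank c) = some (pvRv c + 2) := by
  obtain ⟨hl, hu⟩ := pvRv_bounds c
  unfold convert_rank_value? get_card_rank
  show (PySem.List.index? pv_rk (PySem.List.pyGetD pv_ranks (pvRv c) "")).map (fun n => (n : Int)) = some (pvRv c + 2)
  set m := pvRv c with hm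
  interval_cases m <;> decide

lemma rank_eq_iff (c c' : Int) :
    get_card_rank c = get_card_rank c' ↔ pvRv c = pvRv c' := by
  constructor
  · intro h
    have := crv_rank c
    rw [h, crv_rank c'] at this
    have := Option.some.inj this
    omega
  · intro h
    unfold get_card_rank
    show PySem.List.pyGetD pv_ranks (pvRv c) "" = PySem.List.pyGetD pv_ranks (pvRv c') ""
    rw [h]

lemma foldA (cards : List Int) (d : PySem.Dict Int Int)
    (h : ∀ c ∈ cards, -51 ≤ c ∧ c ≤ 52) :
    cards.foldl (fun acc card =>
        acc.bind (fun d =>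
          (get_card_suit? card).bind (fun _ =>
            (convert_rank_value? (get_card_rank card)).map (fun rv =>
              d.insert rv (d.getD rv 0 + 1))))) (some d)
      = some ((cards.map (fun c => pvRv c + 2)).foldl
          (fun d k => d.insert k (d.getD k 0 + 1)) d) := by
  induction cards generalizing d with
  | nil => rfl
  | cons c t ih =>
    obtain ⟨h1, h2⟩ := h c (by simp)
    obtain ⟨s, hs⟩ := Option.isSome_iff_exists.mp (suit_isSome c h1 h2)
    simp only [List.foldl_cons, List.map_cons, Option.bind_some, hs, crv_rank c,
      Option.map_some, Option.bind_some]
    exact ih _ (fun x hx => h x (by simp [hx]))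

-- ===== VERDICT (by name: the statement is the Claim_ definition above) =====
theorem is_five_of_a_kind_spec : Claim_equal_is_five_of_a_kind := by
  intro cards _ hpre
  unfold Spec_is_five_of_a_kind is_five_of_a_kind is_five_of_a_kind_alt
  by_cases hlen : cards.length = 5
  · have h : ∀ c ∈ cards, -51 ≤ c ∧ c ≤ 52 := by
      rcases hpre with h | h
      · exact absurd hlen h
      · exact h
    obtain ⟨c0, t, rfl⟩ : ∃ c0 t, cards = c0 :: t := by
      cases cards with
      | nil => simp at hlen
      | cons a b => exact ⟨a, b, rfl⟩
    have hget : PySem.List.pyGet? (c0 :: t) 0 = some c0 := by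
      simp [PySem.List.pyGet?, PySem.List.pyIdx?]
    simp only [hlen, ne_eq, not_true_eq_false, if_false, hget]
    rw [foldA _ _ h, PySem.Dict.foldl_insert_getD_add_one_eq_counter]
    show ((PySem.Dict.counter ((c0 :: t).map (fun c => pvRv c + 2))).items.any
        (fun p => p.2 == 5)) = _
    rw [PySem.Dict.items_counter, List.any_map]
    rw [Bool.eq_iff_iff]
    simp only [List.any_eq_true, List.all_eq_true, PySem.Set.mem_ofList,
      Function.comp, beq_iff_eq]
    have hlen' : ((c0 :: t).map (fun c => pvRv c + 2)).length = 5 := by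
      simpa using hlen
    constructor
    · rintro ⟨k, hk, hcount⟩ c hc
      have hcnt : ((c0 :: t).map (fun c => pvRv c + 2)).count k
          = ((c0 :: t).map (fun c => pvRv c + 2)).length := by
        rw [hlen']; exact_mod_cast hcount
      have hall := List.count_eq_length.mp hcnt
      have h1 := hall _ (List.mem_map_of_mem hc)
      have h2 := hall _ (List.mem_map_of_mem (List.mem_cons_self))
      rw [rank_eq_iff]
      omega
    · intro hall
      refine ⟨pvRv c0 + 2, List.mem_map_of_mem (List.mem_cons_self), ?_⟩
      have hcnt : ((c0 :: t).map (fun c => pvRv c + 2)).count (pvRv c0 + 2)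
          = ((c0 :: t).map (fun c => pvRv c + 2)).length := by
        refine List.count_eq_length.mpr ?_
        intro b hb
        obtain ⟨c, hc, rfl⟩ := List.mem_map.mp hb
        have := (rank_eq_iff c c0).mp (hall c hc)
        omega
      rw [hlen'] at hcnt
      exact_mod_cast hcnt
  · simp [hlen]
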